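-- pv_equiv track=rewrite | github.com/longlh123/IPSOS-ESTIMATE-COST | components/validation_field.py | target_audience_validate
-- ===== SOURCE A (Python) =====
-- def target_audience_validate(field_name, value, condition=None):
--     rules = {
--         "sample_type": [
--             {
--                 "check": lambda v: not (v == "-- Select --"),
--                 "error": "Please select a sample type"
--             }
--         ],
--         "industry_name": [
--             {
--                 "check": lambda v: not (v == "-- Select --"),
--                 "error": "Please enter a industry."
--             }
--         ],
--         "target_audience_name": [
--             {
--                 "check": lambda v: bool(v.strip()),
--                 "error": "Please enter a target audience."
--             }
--         ]
--     }
--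
--     field_rules = rules.get(field_name, [])
--
--     for rule in field_rules:
--         if not rule["check"](value):
--             return False, rule["error"]
--
--     return True, ""
-- ===== SOURCE B (Python) =====
-- def target_audience_validate(field_name, value, condition=None):
--     if field_name == "sample_type":
--         if value == "-- Select --":
--             return False, "Please select a sample type"
--     elif field_name == "industry_name":
--         if value == "-- Select --":
--             return False, "Please enter a industry."
--     elif field_name == "target_audience_name":
--         if not value.strip():
--             return False, "Please enter a target audience."
--     return True, ""
-- ===== Notes on version B (the rewrite author's own statement) =====
-- stated objective: simpler
-- what changed: Replaces the per-call rules dictionary (lambdas in lists) and the generic rule loop with direct if/elif branches that do each field's single check inline.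
import Mathlib
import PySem

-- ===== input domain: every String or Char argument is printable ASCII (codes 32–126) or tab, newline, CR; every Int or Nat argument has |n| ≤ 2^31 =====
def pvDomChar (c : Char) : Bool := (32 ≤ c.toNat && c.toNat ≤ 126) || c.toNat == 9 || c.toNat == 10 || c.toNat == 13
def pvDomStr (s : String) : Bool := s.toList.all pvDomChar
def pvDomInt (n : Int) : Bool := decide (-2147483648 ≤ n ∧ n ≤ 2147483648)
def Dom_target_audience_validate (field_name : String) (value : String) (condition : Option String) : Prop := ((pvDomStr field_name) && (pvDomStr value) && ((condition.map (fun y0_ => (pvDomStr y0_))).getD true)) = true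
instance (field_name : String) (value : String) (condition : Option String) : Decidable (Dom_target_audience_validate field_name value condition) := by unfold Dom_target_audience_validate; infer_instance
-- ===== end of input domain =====

-- B replaces A's per-call rules dictionary + generic rule loop with direct if/elif inline checks (simpler decomposition, same behaviour).


-- ===== PORT A =====
-- loop over the field's rules: first failing check returns (False, error)
def pvRuleLoop (rules : List ((String → Bool) × String)) (value : String) : Bool × String :=
  match rules with
  | [] => (true, "")
  | r :: rest => if !(r.1 value) then (false, r.2) else pvRuleLoop rest value

def target_audience_validate (field_name : String) (value : String) (condition : Option String) : Bool × String :=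
  let rules : PySem.Dict String (List ((String → Bool) × String)) :=
    PySem.Dict.ofList
      [("sample_type", [(fun v => !(v == "-- Select --"), "Please select a sample type")]),
       ("industry_name", [(fun v => !(v == "-- Select --"), "Please enter a industry.")]),
       ("target_audience_name", [(fun v => !(PySem.Str.strip v == ""), "Please enter a target audience.")])]
  let field_rules := rules.getD field_name []
  pvRuleLoop field_rules value

-- ===== PORT B =====
def target_audience_validate_alt (field_name : String) (value : String) (condition : Option String) : Bool × String :=
  if field_name == "sample_type" then
    if value == "-- Select --" then (false, "Please select a sample type") else (true, "")
  else if field_name == "industry_name" then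
    if value == "-- Select --" then (false, "Please enter a industry.") else (true, "")
  else if field_name == "target_audience_name" then
    if PySem.Str.strip value == "" then (false, "Please enter a target audience.") else (true, "")
  else (true, "")

-- ===== PRECONDITION & SPEC =====
def Spec_target_audience_validate (field_name : String) (value : String) (condition : Option String) (out : Bool × String) : Prop := out = target_audience_validate_alt field_name value condition
instance (field_name : String) (value : String) (condition : Option String) (out : Bool × String) : Decidable (Spec_target_audience_validate field_name value condition out) := by unfold Spec_target_audience_validate; infer_instance

-- ===== CLAIM (what is proved, stated in full; the proofs are below) =====
def Claim_equal_target_audience_validate : Prop := ∀ (field_name : String) (value : String) (condition : Option String), Dom_target_audience_validate field_name value condition → Spec_target_audience_validate field_name value condition (target_audience_validate field_name value condition)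

-- ===== LEMMAS AND PROOFS =====

-- ===== VERDICT (by name: the statement is the Claim_ definition above) =====
theorem target_audience_validate_spec : Claim_equal_target_audience_validate := by
  intro field_name value condition _
  unfold Spec_target_audience_validate target_audience_validate target_audience_validate_alt
  by_cases h1 : field_name = "sample_type"
  · simp [h1, pvRuleLoop, PySem.Dict.ofList, PySem.Dict.getD, PySem.Dict.update,
          PySem.Dict.insert, PySem.Dict.empty, PySem.Dict.get?, PySem.Dict.contains]
  · by_cases h2 : field_name = "industry_name"
    · simp [h2, pvRuleLoop, PySem.Dict.ofList, PySem.Dict.getD, PySem.Dict.update,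
            PySem.Dict.insert, PySem.Dict.empty, PySem.Dict.get?, PySem.Dict.contains,
            List.find?]
    · by_cases h3 : field_name = "target_audience_name"
      · simp [h3, pvRuleLoop, PySem.Dict.ofList, PySem.Dict.getD, PySem.Dict.update,
              PySem.Dict.insert, PySem.Dict.empty, PySem.Dict.get?, PySem.Dict.contains,
              List.find?]
      · simp [pvRuleLoop, PySem.Dict.ofList, PySem.Dict.getD, PySem.Dict.update,
              PySem.Dict.insert, PySem.Dict.empty, PySem.Dict.get?, PySem.Dict.contains,
              List.find?,
              beq_eq_false_iff_ne.mpr (Ne.symm h1),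
              beq_eq_false_iff_ne.mpr (Ne.symm h2),
              beq_eq_false_iff_ne.mpr (Ne.symm h3), h1, h2, h3]
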